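-- pv_equiv track=rewrite | github.com/Lee12369/BJproblem | 2023-02-13/05-4659.PY | check_three_letter
-- ===== SOURCE A (Python) =====
-- def check_three_letter(word):
--     check = True
--     length = len(word)
--     for i in range(length - 2):
--         lst = [word[i], word[i + 1], word[i + 2]]
--         cnt = 0
--         for x in lst:
--             if x in vowel:
--                 cnt += 1
--         if cnt == 0 or cnt == 3:
--             check = False
--
--     return check
--
-- vowel = ['a', 'e', 'i', 'o', 'u']
-- ===== SOURCE B (Python) =====
-- vowel = ['a', 'e', 'i', 'o', 'u']
--
-- def check_three_letter(word):
--     prev = None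
--     run = 0
--     for ch in word:
--         t = ch in vowel
--         run = run + 1 if t == prev else 1
--         if run >= 3:
--             return False
--         prev = t
--     return True
-- ===== Notes on version B (the rewrite author's own statement) =====
-- stated objective: simpler
-- what changed: Replaced the per-index 3-character-window vowel count (nested loops, re-classifying each character up to 3 times, always scanning the whole word) by a single pass that maintains the previous character's type and the current same-type run length, returning False as soon as a run reaches 3.
import Mathlib
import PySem

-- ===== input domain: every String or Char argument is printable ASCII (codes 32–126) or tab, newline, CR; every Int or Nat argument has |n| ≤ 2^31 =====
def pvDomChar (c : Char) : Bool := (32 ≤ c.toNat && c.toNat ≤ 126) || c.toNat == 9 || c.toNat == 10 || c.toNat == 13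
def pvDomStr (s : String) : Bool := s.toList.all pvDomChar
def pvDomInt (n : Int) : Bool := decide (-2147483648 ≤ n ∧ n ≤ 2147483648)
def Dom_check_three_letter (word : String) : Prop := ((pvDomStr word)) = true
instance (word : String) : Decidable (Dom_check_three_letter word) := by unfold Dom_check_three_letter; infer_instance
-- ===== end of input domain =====

-- B replaces A's per-index 3-window vowel count by a single run-length pass (objective: simpler).


-- ===== PORT A =====
def vowel : List Char := ['a', 'e', 'i', 'o', 'u']

-- indices i, i+1, i+2 are always in range, so getD's default is never used
def check_three_letter (word : String) : Bool :=
  let w := word.toList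
  let length := w.length
  (List.range (length - 2)).foldl
    (fun check i =>
      let lst := [w.getD i ' ', w.getD (i + 1) ' ', w.getD (i + 2) ' ']
      let cnt := lst.foldl (fun cnt x => if vowel.contains x then cnt + 1 else cnt) (0 : Nat)
      if cnt = 0 ∨ cnt = 3 then false else check)
    true

-- ===== PORT B =====
def altRun (prev : Option Bool) (run : Nat) : List Char → Bool
  | [] => true
  | c :: rest =>
    let t := vowel.contains c
    let run' := if (some t) == prev then run + 1 else 1
    if 3 ≤ run' then false else altRun (some t) run' rest

def check_three_letter_alt (word : String) : Bool := altRun none 0 word.toList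

-- ===== PRECONDITION & SPEC =====
def Spec_check_three_letter (word : String) (out : Bool) : Prop := out = check_three_letter_alt word
instance (word : String) (out : Bool) : Decidable (Spec_check_three_letter word out) := by unfold Spec_check_three_letter; infer_instance

-- ===== CLAIM (what is proved, stated in full; the proofs are below) =====
def Claim_equal_check_three_letter : Prop := ∀ (word : String), Dom_check_three_letter word → Spec_check_three_letter word (check_three_letter word)

-- ===== LEMMAS AND PROOFS =====

/-- character type: vowel (true) or consonant (false) -/
def ty (c : Char) : Bool := vowel.contains c

/-- the window condition A tests at each index, as a Bool on the three characters -/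
def winBad (a b c : Char) : Bool :=
  let cnt := [a, b, c].foldl (fun cnt x => if vowel.contains x then cnt + 1 else cnt) (0 : Nat)
  decide (cnt = 0 ∨ cnt = 3)

/-- shared reference predicate: no 3 consecutive characters of the same type -/
def noTriple : List Char → Bool
  | a :: b :: c :: rest => if ty a == ty b && ty b == ty c then false else noTriple (b :: c :: rest)
  | _ => true

def badAt (w : List Char) (i : Nat) : Prop :=
  ty (w.getD i ' ') = ty (w.getD (i + 1) ' ') ∧ ty (w.getD (i + 1) ' ') = ty (w.getD (i + 2) ' ')

lemma winBad_true (a b c : Char) :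
    winBad a b c = true ↔ (ty a = ty b ∧ ty b = ty c) := by
  unfold winBad ty
  by_cases h1 : a ∈ vowel <;> by_cases h2 : b ∈ vowel <;> by_cases h3 : c ∈ vowel <;>
    simp [h1, h2, h3]

lemma foldl_flagP (p : Nat → Prop) [DecidablePred p] (l : List Nat) (b : Bool) :
    l.foldl (fun check i => if p i then false else check) b
      = (b && !l.any fun i => decide (p i)) := by
  induction l generalizing b with
  | nil => simp
  | cons a l ih =>
    by_cases h : p a
    · rw [List.foldl_cons, if_pos h, ih]
      simp [h]
    · rw [List.foldl_cons, if_neg h, ih]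
      simp [h]

def pcnt (w : List Char) (i : Nat) : Nat :=
  List.foldl (fun cnt x => if vowel.contains x then cnt + 1 else cnt) (0 : Nat)
    [w.getD i ' ', w.getD (i + 1) ' ', w.getD (i + 2) ' ']

lemma checkA_any (w : List Char) :
    (List.range (w.length - 2)).foldl
      (fun check i =>
        let lst := [w.getD i ' ', w.getD (i + 1) ' ', w.getD (i + 2) ' ']
        let cnt := lst.foldl (fun cnt x => if vowel.contains x then cnt + 1 else cnt) (0 : Nat)
        if cnt = 0 ∨ cnt = 3 then false else check)
      true
    = !((List.range (w.length - 2)).any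
        (fun i => winBad (w.getD i ' ') (w.getD (i + 1) ' ') (w.getD (i + 2) ' '))) := by
  have h : (fun (check : Bool) (i : Nat) =>
        let lst := [w.getD i ' ', w.getD (i + 1) ' ', w.getD (i + 2) ' ']
        let cnt := lst.foldl (fun cnt x => if vowel.contains x then cnt + 1 else cnt) (0 : Nat)
        if cnt = 0 ∨ cnt = 3 then false else check)
      = (fun (check : Bool) (i : Nat) =>
          if (fun j => pcnt w j = 0 ∨ pcnt w j = 3) i then false else check) := rfl
  rw [h, foldl_flagP (fun j => pcnt w j = 0 ∨ pcnt w j = 3)]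
  have h2 : (fun i => decide ((fun j => pcnt w j = 0 ∨ pcnt w j = 3) i))
      = (fun i => winBad (w.getD i ' ') (w.getD (i + 1) ' ') (w.getD (i + 2) ' ')) := by
    funext i; rfl
  rw [h2, Bool.true_and]

lemma badAt_cons (x : Char) (t : List Char) (i : Nat) :
    badAt (x :: t) (i + 1) ↔ badAt t i := by
  unfold badAt
  rw [show i + 1 + 2 = (i + 2) + 1 from by omega]
  simp

lemma noTriple_iff (w : List Char) :
    noTriple w = true ↔ ∀ i, i < w.length - 2 → ¬ badAt w i := by
  induction w with
  | nil =>
    constructor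
    · intro _ i hi; simp at hi
    · intro _; rfl
  | cons a t ih =>
    match t with
    | [] =>
      constructor
      · intro _ i hi; simp at hi
      · intro _; rfl
    | [b] =>
      constructor
      · intro _ i hi; simp at hi
      · intro _; rfl
    | b :: c :: rest =>
      have hstep : noTriple (a :: b :: c :: rest)
          = if ty a == ty b && ty b == ty c then false else noTriple (b :: c :: rest) := rfl
      cases hb : (ty a == ty b && ty b == ty c) with
      | true =>
        have hc : ty a = ty b ∧ ty b = ty c := by simpa using hb
        rw [hstep, hb]
        simp only [if_true]
        constructor
        · intro h; exact absurd h (by simp)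
        · intro H
          exact absurd (show badAt (a :: b :: c :: rest) 0 from by simpa [badAt] using hc)
            (H 0 (by simp))
      | false =>
        rw [hstep, hb]
        simp only [Bool.false_eq_true, if_false]
        rw [ih]
        constructor
        · intro H i hi
          cases i with
          | zero =>
            intro hbad
            simp [badAt] at hbad
            simp [hbad.1, hbad.2] at hb
          | succ j =>
            rw [badAt_cons]
            exact H j (by simp at hi ⊢; omega)
        · intro H j hj
          rw [← badAt_cons a]
          exact H (j + 1) (by simp at hj ⊢; omega)

lemma A_eq_noTriple (w : List Char) :
    (List.range (w.length - 2)).foldl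
      (fun check i =>
        let lst := [w.getD i ' ', w.getD (i + 1) ' ', w.getD (i + 2) ' ']
        let cnt := lst.foldl (fun cnt x => if vowel.contains x then cnt + 1 else cnt) (0 : Nat)
        if cnt = 0 ∨ cnt = 3 then false else check)
      true
    = noTriple w := by
  rw [checkA_any, Bool.eq_iff_iff, noTriple_iff]
  have hiff : ∀ i : Nat,
      (winBad (w.getD i ' ') (w.getD (i + 1) ' ') (w.getD (i + 2) ' ') = true) ↔ badAt w i := by
    intro i; unfold badAt; exact winBad_true _ _ _
  constructor
  · intro H i hi hbad
    have hx : ((List.range (w.length - 2)).any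
        (fun i => winBad (w.getD i ' ') (w.getD (i + 1) ' ') (w.getD (i + 2) ' '))) = true :=
      List.any_eq_true.mpr ⟨i, List.mem_range.mpr hi, (hiff i).mpr hbad⟩
    rw [hx] at H
    simp at H
  · intro H
    have hx : ((List.range (w.length - 2)).any
        (fun i => winBad (w.getD i ' ') (w.getD (i + 1) ' ') (w.getD (i + 2) ' '))) = false :=
      List.any_eq_false.mpr (fun i hi hp => H i (List.mem_range.mp hi) ((hiff i).mp hp))
    rw [hx]
    rfl

lemma altRun_cons (p : Option Bool) (r : Nat) (x : Char) (l : List Char) :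
    altRun p r (x :: l) =
      if 3 ≤ (if some (ty x) == p then r + 1 else 1) then false
      else altRun (some (ty x)) (if some (ty x) == p then r + 1 else 1) l := rfl

lemma noTriple_cons (x y z : Char) (l : List Char) :
    noTriple (x :: y :: z :: l)
      = if ty x == ty y && ty y == ty z then false else noTriple (y :: z :: l) := rfl

lemma altRun_bridge (rest : List Char) : ∀ (b c : Char),
    altRun (some (ty c)) (if ty c == ty b then 2 else 1) rest = noTriple (b :: c :: rest) := by
  induction rest with
  | nil => intro b c; cases h : (ty c == ty b) <;> simp [altRun, noTriple]
  | cons d rest ih =>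
    intro b c
    have hid := ih c d
    rw [altRun_cons, noTriple_cons]
    by_cases h2 : ty d = ty c <;> by_cases h1 : ty c = ty b
    · have c1 : (some (ty d) == some (ty c)) = true := by simp [h2]
      have c2 : (ty c == ty b) = true := by simp [h1]
      have c3 : (ty b == ty c && ty c == ty d) = true := by simp [h1, h2]
      simp [c1, c2, c3]
    · have c1 : (some (ty d) == some (ty c)) = true := by simp [h2]
      have c2 : (ty c == ty b) = false := by simp [h1]
      have c3 : (ty b == ty c) = false := by simp; exact fun h => h1 h.symm
      rw [if_pos (show ((ty d == ty c) = true) from by simp [h2])] at hid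
      simp [c1, c2, c3, hid]
    · have c1 : (some (ty d) == some (ty c)) = false := by simp [h2]
      have c3 : (ty c == ty d) = false := by simp; exact fun h => h2 h.symm
      rw [if_neg (show ¬((ty d == ty c) = true) from by simp [h2])] at hid
      simp [c1, c3, hid]
    · have c1 : (some (ty d) == some (ty c)) = false := by simp [h2]
      have c2 : (ty b == ty c) = false := by simp; exact fun h => h1 h.symm
      rw [if_neg (show ¬((ty d == ty c) = true) from by simp [h2])] at hid
      simp [c1, c2, hid]

lemma alt_eq_noTriple (w : List Char) : altRun none 0 w = noTriple w := by
  match w with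
  | [] => rfl
  | [c] => rfl
  | b :: c :: rest =>
    have hb := altRun_bridge rest b c
    have e1 : altRun none 0 (b :: c :: rest) = altRun (some (ty b)) 1 (c :: rest) := rfl
    rw [e1, altRun_cons]
    by_cases h2 : ty c = ty b
    · rw [if_pos (show ((ty c == ty b) = true) from by simp [h2])] at hb
      rw [h2] at hb
      simp [h2, hb]
    · rw [if_neg (show ¬((ty c == ty b) = true) from by simp [h2])] at hb
      simp [h2, hb]

-- ===== VERDICT (by name: the statement is the Claim_ definition above) =====
theorem check_three_letter_spec : Claim_equal_check_three_letter := by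
  intro word _
  unfold Spec_check_three_letter check_three_letter check_three_letter_alt
  rw [alt_eq_noTriple]
  exact A_eq_noTriple word.toList
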